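-- pv_equiv track=rewrite | github.com/ppc64le/pyeco | examples/rake-nltk-example/sub-test1.py | find_all_spans
-- ===== SOURCE A (Python) =====
-- from typing import List, Tuple
--
-- def find_all_spans(text: str, phrase: str) -> List[Tuple[int, int]]:
--     spans = []
--     if not phrase:
--         return spans
--     lt = text.lower()
--     lp = phrase.lower()
--     start = 0
--     while True:
--         idx = lt.find(lp, start)
--         if idx == -1:
--             break
--         spans.append((idx, idx + len(phrase)))
--         start = idx + len(phrase)
--     return spans
-- ===== SOURCE B (Python) =====
-- def find_all_spans(text, phrase):
--     # Two staged passes: (1) enumerate ALL occurrence positions of the lowered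
--     # phrase, overlapping ones included; (2) a greedy left-to-right filter keeps
--     # each hit that starts at or after the end of the last kept span.  Correct
--     # because A's find-and-jump loop always picks the leftmost match at or after
--     # the previous span's end, which is exactly what the greedy filter keeps.
--     if not phrase:
--         return []
--     lt = text.lower()
--     lp = phrase.lower()
--     m = len(phrase)
--     hits = [i for i in range(len(lt) - m + 1) if lt[i:i + m] == lp]
--     spans = []
--     last = 0
--     for i in hits:
--         if i >= last:
--             spans.append((i, i + m))
--             last = i + m
--     return spans
-- ===== Notes on version B (the rewrite author's own statement) =====
-- stated objective: alternative
-- what changed: Replaces A's single find-and-jump loop with two staged passes: first enumerate every (overlapping) occurrence position of the lowered phrase, then a greedy filter over that hit list keeps the non-overlapping spans.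
import Mathlib
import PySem

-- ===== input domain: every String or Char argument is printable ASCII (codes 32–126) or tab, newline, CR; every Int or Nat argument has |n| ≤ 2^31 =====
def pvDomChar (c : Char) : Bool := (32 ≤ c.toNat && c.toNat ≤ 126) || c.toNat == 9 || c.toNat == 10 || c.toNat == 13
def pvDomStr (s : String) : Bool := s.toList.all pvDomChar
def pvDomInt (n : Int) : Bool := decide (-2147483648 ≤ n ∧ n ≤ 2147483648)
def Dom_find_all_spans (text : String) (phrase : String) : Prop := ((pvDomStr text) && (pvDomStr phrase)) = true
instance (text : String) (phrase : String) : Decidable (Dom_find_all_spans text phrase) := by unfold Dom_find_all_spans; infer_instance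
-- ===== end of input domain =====

-- B replaces A's single find-and-jump loop with two staged passes: enumerate every
-- (overlapping) occurrence position of the lowered phrase, then a greedy filter over
-- that hit list keeps the non-overlapping spans; same cost, alternative structure.

-- ===== PORT A =====
-- A's `while True: idx = lt.find(lp, start); … start = idx + len(phrase)` loop; the fuel
-- (lt.length + 1) is only a totality guard — each iteration moves `start` forward by
-- len(phrase) ≥ 1 within the text, so the fuel is never exhausted.
def findSpansLoopA (lt lp : List Char) (plen : Nat) : Int → Nat → List (Int × Int)
  | _, 0 => []
  | start, fuel+1 =>
    if PySem.Chars.findFrom lt lp start = -1 then []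
    else (PySem.Chars.findFrom lt lp start, PySem.Chars.findFrom lt lp start + (plen : Int)) ::
      findSpansLoopA lt lp plen (PySem.Chars.findFrom lt lp start + (plen : Int)) fuel

def find_all_spans (text : String) (phrase : String) : List (Int × Int) :=
  if phrase.toList = [] then []
  else
    let lt := PySem.Chars.lower text.toList
    let lp := PySem.Chars.lower phrase.toList
    findSpansLoopA lt lp phrase.toList.length 0 (lt.length + 1)

-- ===== PORT B =====
-- B's second pass: `for i in hits: if i >= last: spans.append((i, i+m)); last = i+m`
def greedyB (m : Int) : List Int → Int → List (Int × Int)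
  | [], _ => []
  | i :: rest, last =>
    if last ≤ i then (i, i + m) :: greedyB m rest (i + m) else greedyB m rest last

def find_all_spans_alt (text : String) (phrase : String) : List (Int × Int) :=
  if phrase.toList = [] then []
  else
    let lt := PySem.Chars.lower text.toList
    let lp := PySem.Chars.lower phrase.toList
    let m : Int := phrase.toList.length
    -- B's first pass: [i for i in range(len(lt) - m + 1) if lt[i:i+m] == lp]
    let hits := (PySem.List.pyRange 0 ((lt.length : Int) - m + 1) 1).filter
        (fun i => PySem.List.slice lt (some i) (some (i + m)) == lp)
    greedyB m hits 0

-- ===== PRECONDITION & SPEC =====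
def Spec_find_all_spans (text : String) (phrase : String) (out : List (Int × Int)) : Prop := out = find_all_spans_alt text phrase
instance (text : String) (phrase : String) (out : List (Int × Int)) : Decidable (Spec_find_all_spans text phrase out) := by unfold Spec_find_all_spans; infer_instance

-- ===== CLAIM (what is proved, stated in full; the proofs are below) =====
def Claim_equal_find_all_spans : Prop := ∀ (text : String) (phrase : String), Dom_find_all_spans text phrase → Spec_find_all_spans text phrase (find_all_spans text phrase)

-- ===== LEMMAS AND PROOFS =====

lemma lower_ne_nil {l : List Char} (h : l ≠ []) : PySem.Chars.lower l ≠ [] := by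
  intro hc
  apply h
  have hlen := congrArg List.length hc
  simp [PySem.Chars.lower] at hlen
  exact hlen

-- proof-only bridge: the naive window scan, used to connect A's find-jump loop
-- with B's staged hits-then-greedy computation
def findSpansLoopB (lt lp : List Char) (hL : lp ≠ []) (i : Nat) : List (Int × Int) :=
  if h : i + lp.length ≤ lt.length then
    if PySem.List.slice lt (some (i : Int)) (some ((i : Int) + (lp.length : Int))) = lp then
      ((i : Int), (i : Int) + (lp.length : Int)) :: findSpansLoopB lt lp hL (i + lp.length)
    else findSpansLoopB lt lp hL (i + 1)
  else []
termination_by lt.length + 1 - i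
decreasing_by
  · have := List.length_pos_iff.mpr hL; omega
  · omega

lemma infix_drop_of_succ {l m : List Char} {n : Nat} (h : l <:+: m.drop (n+1)) : l <:+: m.drop n := by
  have h2 : m.drop (n+1) = (m.drop n).drop 1 := by rw [List.drop_drop, Nat.add_comm]
  exact h.trans (h2 ▸ List.drop_suffix 1 (m.drop n)).isInfix

-- window equality at position i ↔ lp is a prefix of lt.drop i (under the length guard)
lemma sliceB_eq_iff (lt lp : List Char) (i : Nat) :
    (PySem.List.slice lt (some (i : Int)) (some ((i : Int) + (lp.length : Int))) = lp)
      ↔ lp <+: lt.drop i := by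
  rw [PySem.List.slice_natCast_add]
  constructor
  · intro he; exact he ▸ List.take_prefix _ _
  · intro hp; exact (List.prefix_iff_eq_take.mp hp).symm

lemma loopB_nil (lt lp : List Char) (hL : lp ≠ []) (s : Nat)
    (h : ¬ lp <:+: lt.drop s) : findSpansLoopB lt lp hL s = [] := by
  rw [findSpansLoopB]
  by_cases hg : s + lp.length ≤ lt.length
  · rw [dif_pos hg]
    by_cases hsl : PySem.List.slice lt (some (s : Int)) (some ((s : Int) + (lp.length : Int))) = lp
    · exact absurd ((sliceB_eq_iff lt lp s).mp hsl).isInfix h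
    · rw [if_neg hsl]
      exact loopB_nil lt lp hL (s+1) (fun hc => h (infix_drop_of_succ hc))
  · rw [dif_neg hg]
termination_by lt.length + 1 - s
decreasing_by omega

lemma loopB_skip (lt lp : List Char) (hL : lp ≠ []) (s j : Nat)
    (hsj : s ≤ j) (hj : j + lp.length ≤ lt.length)
    (hno : ∀ i, s ≤ i → i < j → ¬ lp <+: lt.drop i) :
    findSpansLoopB lt lp hL s = findSpansLoopB lt lp hL j := by
  rcases Nat.eq_or_lt_of_le hsj with h | h
  · rw [h]
  · have hg : s + lp.length ≤ lt.length := by omega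
    rw [findSpansLoopB, dif_pos hg,
      if_neg (fun hsl => hno s le_rfl h ((sliceB_eq_iff lt lp s).mp hsl))]
    exact loopB_skip lt lp hL (s+1) j h hj (fun i hi hij => hno i (by omega) hij)
termination_by j - s
decreasing_by omega

-- A's find-jump loop equals the window scan from the same position
lemma loopA_eq_loopB (lt lp : List Char) (hL : lp ≠ []) (fuel s : Nat)
    (hs : s ≤ lt.length) (hf : lt.length - s < fuel) :
    findSpansLoopA lt lp lp.length ((s : Nat) : Int) fuel = findSpansLoopB lt lp hL s := by
  induction fuel generalizing s with
  | zero => omega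
  | succ fuel ih =>
    have hlp : 0 < lp.length := List.length_pos_iff.mpr hL
    rw [findSpansLoopA]
    rw [PySem.Chars.findFrom_natCast lt lp s hs]
    by_cases hf1 : PySem.Chars.find (lt.drop s) lp = -1
    · rw [if_pos hf1, if_pos rfl]
      exact (loopB_nil lt lp hL s ((PySem.Chars.find_eq_neg_one_iff _ _).mp hf1)).symm
    · have hge : 0 ≤ PySem.Chars.find (lt.drop s) lp := by
        have := PySem.Chars.neg_one_le_find (lt.drop s) lp; omega
      obtain ⟨hpre, hmin⟩ := PySem.Chars.find_spec hge
      set f : Nat := (PySem.Chars.find (lt.drop s) lp).toNat with hfdef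
      have hfc : PySem.Chars.find (lt.drop s) lp = (f : Int) := by omega
      have hdd : (lt.drop s).drop f = lt.drop (s + f) := by
        rw [List.drop_drop, Nat.add_comm]
      rw [hdd] at hpre
      have hjlen : (s + f) + lp.length ≤ lt.length := by
        have := hpre.length_le
        simp [List.length_drop] at this
        omega
      have hcond : (if PySem.Chars.find (lt.drop s) lp = -1 then (-1 : Int)
          else (s : Int) + PySem.Chars.find (lt.drop s) lp) = ((s + f : Nat) : Int) := by
        rw [if_neg hf1, hfc]; push_cast; ring
      rw [hcond, if_neg (by omega : ¬ (((s + f : Nat) : Int) = -1))]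
      have hstep : findSpansLoopB lt lp hL s = findSpansLoopB lt lp hL (s + f) := by
        refine loopB_skip lt lp hL s (s + f) (by omega) hjlen ?_
        intro i hi hij
        have hlt : i - s < f := by omega
        have h2 := hmin (i - s) hlt
        rw [List.drop_drop] at h2
        have heq : s + (i - s) = i := by omega
        rwa [heq] at h2
      rw [hstep, findSpansLoopB, dif_pos hjlen,
        if_pos ((sliceB_eq_iff lt lp (s + f)).mpr hpre)]
      have harg : ((s + f : Nat) : Int) + (lp.length : Int) = ((s + f + lp.length : Nat) : Int) := by
        push_cast; ring
      rw [harg, ih (s + f + lp.length) (by omega) (by omega)]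

lemma length_lower (l : List Char) : (PySem.Chars.lower l).length = l.length := by
  simp [PySem.Chars.lower]

-- B's greedy pass over the hit list from position a equals the window scan from s;
-- `last` = t may lag behind s across non-matching positions (hno)
lemma greedy_eq_loopB (lt lp : List Char) (hL : lp ≠ []) :
    ∀ (c a s t : Nat), a + c = lt.length + 1 - lp.length → a ≤ s → t ≤ s →
    (∀ j, t ≤ j → j < s → ¬ lp <+: lt.drop j) →
    greedyB (lp.length : Int)
      (((List.range' a c).map (fun k => ((k : Nat) : Int))).filter
        (fun i => PySem.List.slice lt (some i) (some (i + (lp.length : Int))) == lp))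
      ((t : Nat) : Int)
      = findSpansLoopB lt lp hL s := by
  intro c
  induction c with
  | zero =>
    intro a s t hc has hts hno
    have hM : 0 < lp.length := List.length_pos_iff.mpr hL
    have hguard : ¬ (s + lp.length ≤ lt.length) := by omega
    rw [findSpansLoopB, dif_neg hguard]
    simp [greedyB]
  | succ c ih =>
    intro a s t hc has hts hno
    have hM : 0 < lp.length := List.length_pos_iff.mpr hL
    have hguard : a + lp.length ≤ lt.length := by omega
    rw [List.range'_succ]
    by_cases hc1 : PySem.List.slice lt (some ((a : Nat) : Int)) (some (((a : Nat) : Int) + (lp.length : Int))) = lp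
    · -- a is a hit
      have hmatch : lp <+: lt.drop a := (sliceB_eq_iff lt lp a).mp hc1
      simp only [List.map_cons, List.filter_cons, beq_iff_eq, hc1, if_pos]
      rcases Nat.eq_or_lt_of_le has with heq | hlt
      · -- the hit is at the scan position: both keep it
        subst heq
        rw [greedyB, if_pos (by exact_mod_cast hts)]
        rw [findSpansLoopB, dif_pos hguard, if_pos hc1]
        have harg : ((a : Nat) : Int) + (lp.length : Int) = ((a + lp.length : Nat) : Int) := by
          push_cast; ring
        rw [harg]
        exact congrArg (List.cons _) (ih (a+1) (a + lp.length) (a + lp.length) (by omega) (by omega) (le_refl _)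
          (fun j h1 h2 => absurd h2 (by omega)))
      · -- the hit is before the scan position: greedy skips it (a < t by hno)
        have hat : a < t := by
          by_contra hcon
          exact hno a (by omega) hlt hmatch
        rw [greedyB, if_neg (by exact_mod_cast by omega : ¬ ((t : Int) ≤ (a : Int)))]
        exact ih (a+1) s t (by omega) (by omega) hts hno
    · -- a is not a hit
      have hnomatch : ¬ lp <+: lt.drop a := fun hm => hc1 ((sliceB_eq_iff lt lp a).mpr hm)
      simp only [List.map_cons, List.filter_cons, beq_iff_eq, hc1, ite_false]
      rcases Nat.eq_or_lt_of_le has with heq | hlt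
      · subst heq
        rw [findSpansLoopB, dif_pos hguard, if_neg hc1]
        exact ih (a+1) (a+1) t (by omega) (le_refl _) (by omega)
          (fun j h1 h2 => by
            rcases Nat.lt_or_ge j a with hj | hj
            · exact hno j h1 hj
            · have : j = a := by omega
              exact this ▸ hnomatch)
      · exact ih (a+1) s t (by omega) (by omega) hts hno

-- ===== VERDICT (by name: the statement is the Claim_ definition above) =====
theorem find_all_spans_spec : Claim_equal_find_all_spans := by
  intro text phrase _
  unfold Spec_find_all_spans find_all_spans find_all_spans_alt
  by_cases h : phrase.toList = []
  · simp [h]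
  · simp only [if_neg h]
    set lt := PySem.Chars.lower text.toList with hlt
    set lp := PySem.Chars.lower phrase.toList with hlp
    have hL : lp ≠ [] := lower_ne_nil h
    have hMeq : phrase.toList.length = lp.length := (length_lower _).symm
    rw [hMeq]
    rw [PySem.List.pyRange_one]
    have htoNat : (((lt.length : Int) - (lp.length : Int) + 1) - 0).toNat
        = lt.length + 1 - lp.length := by omega
    rw [htoNat]
    have hmap : (List.range (lt.length + 1 - lp.length)).map (fun k => (0 : Int) + (k : Nat))
        = (List.range' 0 (lt.length + 1 - lp.length)).map (fun k => ((k : Nat) : Int)) := by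
      rw [List.range_eq_range']
      simp
    rw [hmap]
    have hg := greedy_eq_loopB lt lp hL (lt.length + 1 - lp.length) 0 0 0 (by omega)
      (le_refl 0) (le_refl 0) (fun j h1 h2 => absurd h2 (by omega))
    simp only [Nat.cast_zero] at hg
    rw [hg]
    exact loopA_eq_loopB lt lp hL (lt.length + 1) 0 (by omega) (by omega)
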